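-- pv_equiv track=rewrite | github.com/hmcneill46/house-rules-led-recreation | main.py | text_to_columns
-- ===== SOURCE A (Python) =====
-- MATRIX_HEIGHT = 7
--
-- INTER_CHAR_BLANKS = 1
--
-- FONT = {
--     'a': ["0000","0000","0110","0001","0111","1001","0111"], # Confirmed correct
--     'b': ["1000","1000","1110","1001","1001","1001","0110"], # Confirmed correct
--     'c': ["000","000","011","100","100","100","011"], # Confirmed correct
--     'd': ["0001","0001","0111","1001","1001","1001","0110"], # Confirmed correct
--     'e': ["0000","0000","0110","1001","1111","1000","0111"], # Confirmed correct
--     'f': ["011","100","111","100","100","100","100"], # Confirmed correct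
--     'g': ["0000","0000","0110","1001","1111","0001","1110"], # Confirmed correct
--     'h': ["1000","1000","1110","1001","1001","1001","1001"], # Confirmed correct
--     'i': ["1","0","1","1","1","1","1"], # Confirmed correct
--     'j': ["01","00","01","01","01","01","11"], # Confirmed correct
--     'k': ["1000","1000","1001","1010","1100","1010","1001"], # Confirmed correct
--     'l': ["1","1","1","1","1","1","1"], # Confirmed correct
--     'm': ["00000","00000","01010","10101","10101","10101","10101"], # Confirmed correct
--     'n': ["0000","0000","0110","1001","1001","1001","1001"], # Confirmed correct
--     'o': ["0000","0000","0110","1001","1001","1001","0110"], # Confirmed correct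
--     'p': ["0000","0000","0110","1001","1001","1110","1000"], # Confirmed correct
--     'q': ["0000","0000","0110","1001","1001","0111","0001"], # Confirmed correct
--     'r': ["000","000","011","100","100","100","100"], # Confirmed correct
--     's': ["0000","0000","0111","1000","0110","0001","1110"], # Confirmed correct
--     't': ["100","100","111","100","100","100","011"], # Confirmed correct
--     'u': ["0000","0000","1001","1001","1001","1001","0110"], # Confirmed correct
--     'v': ["00000","00000","10001","10001","10001","01010","00100"], # Confirmed correct
--     'w': ["00000","00000","10101","10101","10101","10101","01010"], # Confirmed correct
--     'x': ["00000","00000","10001","01010","00100","01010","10001"], # Confirmed correct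
--     'y': ["0000","0000","1001","1001","0111","0001","1110"], # Confirmed correct
--     'z': ["0000","0000","1111","0001","0110","1000","1111"], # Confirmed correct
--     '!': ["1","1","1","1","0","1","1"], # Confirmed correct
--     '?': ["01110","10001","00001","00010","00100","00000","00100"], # Confirmed correct
--     ' ': ["0"] * 7,
-- }
--
-- def char_to_columns(ch):
--     ch = ch.lower()
--     if ch not in FONT:
--         rows = FONT[' ']
--     else:
--         rows = FONT[ch]
--
--     # pad top if needed
--     if len(rows) < MATRIX_HEIGHT:
--         pad_top = MATRIX_HEIGHT - len(rows)
--         rows = ([("0" * len(rows[0]))] * pad_top) + rows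
--
--     char_width = len(rows[0])
--     cols = []
--     for c in range(char_width):
--         col = []
--         for r in range(MATRIX_HEIGHT):
--             bit = rows[r][c] if c < len(rows[r]) else "0"
--             col.append(1 if bit == "1" else 0)
--         cols.append(col)
--     return cols
--
-- def text_to_columns(text):
--     all_cols = []
--     for i, ch in enumerate(text):
--         ch_cols = char_to_columns(ch)
--         all_cols.extend(ch_cols)
--         for _ in range(INTER_CHAR_BLANKS):
--             all_cols.append([0] * MATRIX_HEIGHT)
--     return all_cols
-- ===== SOURCE B (Python) =====
-- MATRIX_HEIGHT = 7
--
-- INTER_CHAR_BLANKS = 1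
--
-- # Column-major bitmap font: for each character, the list of its column bitmasks,
-- # bit r (weight 1<<r) being row r counted from the top, glyphs already top-padded
-- # to 7 rows.  Decoding a column is just extracting 7 bits.
-- COLFONT = {
--     'a': [32, 84, 84, 120], 'b': [63, 68, 68, 56], 'c': [56, 68, 68],
--     'd': [56, 68, 68, 63], 'e': [56, 84, 84, 88], 'f': [126, 5, 5],
--     'g': [88, 84, 84, 56], 'h': [127, 4, 4, 120], 'i': [125], 'j': [64, 125],
--     'k': [127, 16, 40, 68], 'l': [127], 'm': [120, 4, 120, 4, 120],
--     'n': [120, 4, 4, 120], 'o': [56, 68, 68, 56], 'p': [120, 36, 36, 24],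
--     'q': [24, 36, 36, 120], 'r': [120, 4, 4], 's': [72, 84, 84, 36],
--     't': [63, 68, 68], 'u': [60, 64, 64, 60], 'v': [28, 32, 64, 32, 28],
--     'w': [60, 64, 60, 64, 60], 'x': [68, 40, 16, 40, 68],
--     'y': [76, 80, 80, 60], 'z': [100, 84, 84, 76], '!': [111],
--     '?': [2, 1, 81, 9, 6], ' ': [0],
-- }
--
-- def text_to_columns(text):
--     out = []
--     for ch in text:
--         for m in COLFONT.get(ch.lower(), COLFONT[' ']):
--             out.append([(m >> r) & 1 for r in range(7)])
--         out.append([0] * 7)  # inter-character blank column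
--     return out
-- ===== Notes on version B (the rewrite author's own statement) =====
-- stated objective: alternative
-- what changed: B replaces the row-string font and per-character column construction by a precomputed column-major bitmap font (one integer bitmask per glyph column, glyphs already top-padded) and emits each column by extracting its 7 bits with shifts, plus one blank column per character.
import Mathlib
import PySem

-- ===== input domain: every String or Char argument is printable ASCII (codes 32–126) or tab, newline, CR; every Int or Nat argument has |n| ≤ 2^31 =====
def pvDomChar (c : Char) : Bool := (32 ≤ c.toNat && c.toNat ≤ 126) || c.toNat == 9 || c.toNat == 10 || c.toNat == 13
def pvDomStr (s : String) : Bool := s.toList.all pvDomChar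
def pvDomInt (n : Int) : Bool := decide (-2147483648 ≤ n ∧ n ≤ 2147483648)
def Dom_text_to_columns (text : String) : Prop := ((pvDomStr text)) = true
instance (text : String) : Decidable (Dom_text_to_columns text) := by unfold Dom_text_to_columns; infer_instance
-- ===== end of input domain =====

-- B renders glyphs from a precomputed column-major bitmap font (one bitmask per column)
-- instead of A's row-string font with per-character column building; same output (alternative).

-- ===== PORT A =====
-- the FONT table (module constant of A; glyph rows as char lists)
def FONT : PySem.Dict Char (List (List Char)) := PySem.Dict.ofList [
  ('a', [['0','0','0','0'], ['0','0','0','0'], ['0','1','1','0'], ['0','0','0','1'], ['0','1','1','1'], ['1','0','0','1'], ['0','1','1','1']]),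
  ('b', [['1','0','0','0'], ['1','0','0','0'], ['1','1','1','0'], ['1','0','0','1'], ['1','0','0','1'], ['1','0','0','1'], ['0','1','1','0']]),
  ('c', [['0','0','0'], ['0','0','0'], ['0','1','1'], ['1','0','0'], ['1','0','0'], ['1','0','0'], ['0','1','1']]),
  ('d', [['0','0','0','1'], ['0','0','0','1'], ['0','1','1','1'], ['1','0','0','1'], ['1','0','0','1'], ['1','0','0','1'], ['0','1','1','0']]),
  ('e', [['0','0','0','0'], ['0','0','0','0'], ['0','1','1','0'], ['1','0','0','1'], ['1','1','1','1'], ['1','0','0','0'], ['0','1','1','1']]),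
  ('f', [['0','1','1'], ['1','0','0'], ['1','1','1'], ['1','0','0'], ['1','0','0'], ['1','0','0'], ['1','0','0']]),
  ('g', [['0','0','0','0'], ['0','0','0','0'], ['0','1','1','0'], ['1','0','0','1'], ['1','1','1','1'], ['0','0','0','1'], ['1','1','1','0']]),
  ('h', [['1','0','0','0'], ['1','0','0','0'], ['1','1','1','0'], ['1','0','0','1'], ['1','0','0','1'], ['1','0','0','1'], ['1','0','0','1']]),
  ('i', [['1'], ['0'], ['1'], ['1'], ['1'], ['1'], ['1']]),
  ('j', [['0','1'], ['0','0'], ['0','1'], ['0','1'], ['0','1'], ['0','1'], ['1','1']]),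
  ('k', [['1','0','0','0'], ['1','0','0','0'], ['1','0','0','1'], ['1','0','1','0'], ['1','1','0','0'], ['1','0','1','0'], ['1','0','0','1']]),
  ('l', [['1'], ['1'], ['1'], ['1'], ['1'], ['1'], ['1']]),
  ('m', [['0','0','0','0','0'], ['0','0','0','0','0'], ['0','1','0','1','0'], ['1','0','1','0','1'], ['1','0','1','0','1'], ['1','0','1','0','1'], ['1','0','1','0','1']]),
  ('n', [['0','0','0','0'], ['0','0','0','0'], ['0','1','1','0'], ['1','0','0','1'], ['1','0','0','1'], ['1','0','0','1'], ['1','0','0','1']]),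
  ('o', [['0','0','0','0'], ['0','0','0','0'], ['0','1','1','0'], ['1','0','0','1'], ['1','0','0','1'], ['1','0','0','1'], ['0','1','1','0']]),
  ('p', [['0','0','0','0'], ['0','0','0','0'], ['0','1','1','0'], ['1','0','0','1'], ['1','0','0','1'], ['1','1','1','0'], ['1','0','0','0']]),
  ('q', [['0','0','0','0'], ['0','0','0','0'], ['0','1','1','0'], ['1','0','0','1'], ['1','0','0','1'], ['0','1','1','1'], ['0','0','0','1']]),
  ('r', [['0','0','0'], ['0','0','0'], ['0','1','1'], ['1','0','0'], ['1','0','0'], ['1','0','0'], ['1','0','0']]),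
  ('s', [['0','0','0','0'], ['0','0','0','0'], ['0','1','1','1'], ['1','0','0','0'], ['0','1','1','0'], ['0','0','0','1'], ['1','1','1','0']]),
  ('t', [['1','0','0'], ['1','0','0'], ['1','1','1'], ['1','0','0'], ['1','0','0'], ['1','0','0'], ['0','1','1']]),
  ('u', [['0','0','0','0'], ['0','0','0','0'], ['1','0','0','1'], ['1','0','0','1'], ['1','0','0','1'], ['1','0','0','1'], ['0','1','1','0']]),
  ('v', [['0','0','0','0','0'], ['0','0','0','0','0'], ['1','0','0','0','1'], ['1','0','0','0','1'], ['1','0','0','0','1'], ['0','1','0','1','0'], ['0','0','1','0','0']]),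
  ('w', [['0','0','0','0','0'], ['0','0','0','0','0'], ['1','0','1','0','1'], ['1','0','1','0','1'], ['1','0','1','0','1'], ['1','0','1','0','1'], ['0','1','0','1','0']]),
  ('x', [['0','0','0','0','0'], ['0','0','0','0','0'], ['1','0','0','0','1'], ['0','1','0','1','0'], ['0','0','1','0','0'], ['0','1','0','1','0'], ['1','0','0','0','1']]),
  ('y', [['0','0','0','0'], ['0','0','0','0'], ['1','0','0','1'], ['1','0','0','1'], ['0','1','1','1'], ['0','0','0','1'], ['1','1','1','0']]),
  ('z', [['0','0','0','0'], ['0','0','0','0'], ['1','1','1','1'], ['0','0','0','1'], ['0','1','1','0'], ['1','0','0','0'], ['1','1','1','1']]),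
  ('!', [['1'], ['1'], ['1'], ['1'], ['0'], ['1'], ['1']]),
  ('?', [['0','1','1','1','0'], ['1','0','0','0','1'], ['0','0','0','0','1'], ['0','0','0','1','0'], ['0','0','1','0','0'], ['0','0','0','0','0'], ['0','0','1','0','0']]),
  (' ', [['0'], ['0'], ['0'], ['0'], ['0'], ['0'], ['0']])]

-- A's helper char_to_columns, step for step (indices are nonnegative and the out-of-range
-- guard is written exactly as Python's `c < len(rows[r])` test)
def char_to_columns (ch : Char) : List (List Int) :=
  let ch := PySem.Chars.lowerChar ch
  let rows := if (FONT.get? ch).isNone then FONT.getD ' ' [] else FONT.getD ch []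
  let rows := if rows.length < 7 then
      List.replicate (7 - rows.length) (List.replicate (rows.headD []).length '0') ++ rows
    else rows
  let charWidth := (rows.headD []).length
  (List.range charWidth).map (fun c =>
    (List.range 7).map (fun r =>
      let bit := if c < (rows.getD r []).length then (rows.getD r []).getD c '0' else '0'
      if bit = '1' then (1 : Int) else 0))

def text_to_columns (text : String) : List (List Int) :=
  text.toList.foldl
    (fun allCols ch => (allCols ++ char_to_columns ch) ++ [List.replicate 7 (0 : Int)]) []

-- ===== PORT B =====
-- B's column-major bitmap font: one bitmask per glyph column, bit r = row r from the top,
-- glyphs already top-padded to 7 rows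
def COLFONT : PySem.Dict Char (List Nat) := PySem.Dict.ofList [
  ('a', [32, 84, 84, 120]), ('b', [63, 68, 68, 56]), ('c', [56, 68, 68]),
  ('d', [56, 68, 68, 63]), ('e', [56, 84, 84, 88]), ('f', [126, 5, 5]),
  ('g', [88, 84, 84, 56]), ('h', [127, 4, 4, 120]), ('i', [125]), ('j', [64, 125]),
  ('k', [127, 16, 40, 68]), ('l', [127]), ('m', [120, 4, 120, 4, 120]),
  ('n', [120, 4, 4, 120]), ('o', [56, 68, 68, 56]), ('p', [120, 36, 36, 24]),
  ('q', [24, 36, 36, 120]), ('r', [120, 4, 4]), ('s', [72, 84, 84, 36]),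
  ('t', [63, 68, 68]), ('u', [60, 64, 64, 60]), ('v', [28, 32, 64, 32, 28]),
  ('w', [60, 64, 60, 64, 60]), ('x', [68, 40, 16, 40, 68]),
  ('y', [76, 80, 80, 60]), ('z', [100, 84, 84, 76]), ('!', [111]),
  ('?', [2, 1, 81, 9, 6]), (' ', [0])]

-- `[(m >> r) & 1 for r in range(7)]` (m is a nonnegative bitmask, so Nat >>> / &&& are exact)
def decodeCol (m : Nat) : List Int :=
  (List.range 7).map (fun r => (((m >>> r) &&& 1 : Nat) : Int))

def text_to_columns_alt (text : String) : List (List Int) :=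
  text.toList.foldl (fun out ch =>
    ((COLFONT.getD (PySem.Chars.lowerChar ch) (COLFONT.getD ' ' [])).foldl
        (fun o m => o ++ [decodeCol m]) out) ++ [List.replicate 7 (0 : Int)]) []

-- ===== PRECONDITION & SPEC =====
def Spec_text_to_columns (text : String) (out : List (List Int)) : Prop := out = text_to_columns_alt text
instance (text : String) (out : List (List Int)) : Decidable (Spec_text_to_columns text out) := by unfold Spec_text_to_columns; infer_instance

-- ===== CLAIM (what is proved, stated in full; the proofs are below) =====
def Claim_equal_text_to_columns : Prop := ∀ (text : String), Dom_text_to_columns text → Spec_text_to_columns text (text_to_columns text)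

-- ===== LEMMAS AND PROOFS =====

-- the shared key set of the two fonts
def KEYS : List Char :=
  ['a','b','c','d','e','f','g','h','i','j','k','l','m','n','o','p','q','r','s','t','u','v','w','x','y','z','!','?',' ']

-- per lowered character: A's column construction equals decoding B's bitmask columns
lemma per_key (k : Char) :
    (let rows := if (FONT.get? k).isNone then FONT.getD ' ' [] else FONT.getD k []
     let rows := if rows.length < 7 then
         List.replicate (7 - rows.length) (List.replicate (rows.headD []).length '0') ++ rows
       else rows
     let charWidth := (rows.headD []).length
     (List.range charWidth).map (fun c =>
       (List.range 7).map (fun r =>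
         let bit := if c < (rows.getD r []).length then (rows.getD r []).getD c '0' else '0'
         if bit = '1' then (1 : Int) else 0)))
    = (COLFONT.getD k (COLFONT.getD ' ' [])).map decodeCol := by
  by_cases hm : k ∈ KEYS
  · fin_cases hm <;> decide
  · have hkeys : FONT.keys = KEYS := by decide
    have hckeys : COLFONT.keys = KEYS := by decide
    have h1 : FONT.get? k = none := by
      rw [PySem.Dict.get?_eq_none_iff_not_mem_keys, hkeys]; exact hm
    have h2 : COLFONT.get? k = none := by
      rw [PySem.Dict.get?_eq_none_iff_not_mem_keys, hckeys]; exact hm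
    simp only [h1, h2, Option.isNone_none, if_true, PySem.Dict.getD_eq_get?_getD,
      Option.getD_none]
    decide

lemma per_char (ch : Char) :
    char_to_columns ch
      = (COLFONT.getD (PySem.Chars.lowerChar ch) (COLFONT.getD ' ' [])).map decodeCol :=
  per_key (PySem.Chars.lowerChar ch)

-- A's loop as a flatMap
lemma a_flatMap (text : String) :
    text_to_columns text
      = text.toList.flatMap (fun ch => char_to_columns ch ++ [List.replicate 7 (0 : Int)]) := by
  unfold text_to_columns
  have : (fun (allCols : List (List Int)) ch =>
      (allCols ++ char_to_columns ch) ++ [List.replicate 7 (0 : Int)])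
      = fun allCols ch => allCols ++ (char_to_columns ch ++ [List.replicate 7 (0 : Int)]) := by
    funext a c; rw [List.append_assoc]
  rw [this, PySem.List.foldl_append_eq_flatMap, List.nil_append]

-- B's loop as a flatMap
lemma b_flatMap (text : String) :
    text_to_columns_alt text
      = text.toList.flatMap (fun ch =>
          (COLFONT.getD (PySem.Chars.lowerChar ch) (COLFONT.getD ' ' [])).map decodeCol
            ++ [List.replicate 7 (0 : Int)]) := by
  unfold text_to_columns_alt
  have : (fun (out : List (List Int)) ch =>
      ((COLFONT.getD (PySem.Chars.lowerChar ch) (COLFONT.getD ' ' [])).foldl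
          (fun o m => o ++ [decodeCol m]) out) ++ [List.replicate 7 (0 : Int)])
      = fun out ch => out ++
          ((COLFONT.getD (PySem.Chars.lowerChar ch) (COLFONT.getD ' ' [])).map decodeCol
            ++ [List.replicate 7 (0 : Int)]) := by
    funext o c
    rw [PySem.List.foldl_append_singleton_eq_map, List.append_assoc]
  rw [this, PySem.List.foldl_append_eq_flatMap, List.nil_append]

-- ===== VERDICT (by name: the statement is the Claim_ definition above) =====
theorem text_to_columns_spec : Claim_equal_text_to_columns := by
  intro text _
  unfold Spec_text_to_columns
  rw [a_flatMap, b_flatMap]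
  exact List.flatMap_congr (fun ch _ => by rw [per_char ch])
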